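-- pv_equiv track=rewrite | github.com/laud1204/TDsPython | TD6/exercice3.py | matrice_nXn
-- ===== SOURCE A (Python) =====
-- def matrice_nXn(n):
--     matrice =[]
--     for i in range(n):
--         ligne = []
--         for j in range(n):
--             ligne.append(2**j)
--         matrice.append(ligne)
--     return matrice
-- ===== SOURCE B (Python) =====
-- def matrice_nXn(n):
--     # Grow the matrix by columns: at step k, append the current power of two to
--     # every existing row and then add one more such row; double the power.
--     rows = []
--     p = 1
--     for _ in range(n):
--         rows = [r + [p] for r in rows]
--         rows.append(list(rows[0]) if rows else [p])
--         p *= 2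
--     return rows
-- ===== Notes on version B (the rewrite author's own statement) =====
-- stated objective: alternative
-- what changed: B grows the matrix column by column with a running doubled power (extend every existing row with it, add one more row, double), instead of A's nested loops recomputing each power per cell.
import Mathlib
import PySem

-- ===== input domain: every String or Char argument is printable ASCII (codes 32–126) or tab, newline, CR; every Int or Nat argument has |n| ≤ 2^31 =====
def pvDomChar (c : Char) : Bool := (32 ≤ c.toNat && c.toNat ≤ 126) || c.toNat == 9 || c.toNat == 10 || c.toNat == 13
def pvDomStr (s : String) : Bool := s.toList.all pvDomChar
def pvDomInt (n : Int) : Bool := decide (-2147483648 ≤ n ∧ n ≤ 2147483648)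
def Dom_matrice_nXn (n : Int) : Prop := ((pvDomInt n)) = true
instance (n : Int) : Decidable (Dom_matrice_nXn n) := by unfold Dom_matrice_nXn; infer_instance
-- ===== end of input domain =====

-- B grows the matrix column by column with a running doubled power instead of A's nested per-cell loops (alternative algorithm, same cost).

-- ===== PORT A =====
-- nested loops: for each i, rebuild the row by appending 2**j for each j
def matrice_nXn (n : Int) : List (List Int) :=
  (PySem.List.pyRange 0 n 1).foldl
    (fun matrice _i =>
      matrice ++ [(PySem.List.pyRange 0 n 1).foldl (fun ligne j => ligne ++ [2 ^ j.toNat]) []])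
    []

-- ===== PORT B =====
-- column-growing loop: state (rows, p); extend each row with p, add one more row, double p
def matrice_nXn_alt (n : Int) : List (List Int) :=
  ((PySem.List.pyRange 0 n 1).foldl
    (fun (st : List (List Int) × Int) _ =>
      let rows := st.1.map (fun r => r ++ [st.2])
      (rows ++ [match rows with | [] => [st.2] | r :: _ => r], st.2 * 2))
    ([], 1)).1

-- ===== PRECONDITION & SPEC =====
def Spec_matrice_nXn (n : Int) (out : List (List Int)) : Prop := out = matrice_nXn_alt n
instance (n : Int) (out : List (List Int)) : Decidable (Spec_matrice_nXn n out) := by unfold Spec_matrice_nXn; infer_instance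

-- ===== CLAIM (what is proved, stated in full; the proofs are below) =====
def Claim_equal_matrice_nXn : Prop := ∀ (n : Int), Dom_matrice_nXn n → Spec_matrice_nXn n (matrice_nXn n)

-- ===== LEMMAS AND PROOFS =====
theorem foldl_push_eq_map {α β : Type} (f : α → β) (l : List α) (acc : List β) :
    l.foldl (fun a x => a ++ [f x]) acc = acc ++ l.map f := by
  induction l generalizing acc with
  | nil => simp
  | cons x xs ih => simp [List.foldl, ih]

theorem rep_snoc {α : Type} (p : Nat) (x : α) :
    List.replicate p x ++ [x] = x :: List.replicate p x := by
  induction p with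
  | zero => rfl
  | succ q ih => simp [List.replicate_succ, ih]

theorem alt_loop_eq (m : Nat) :
    (List.range m).foldl
      (fun (st : List (List Int) × Int) (_ : Nat) =>
        let rows := st.1.map (fun r => r ++ [st.2])
        (rows ++ [match rows with | [] => [st.2] | r :: _ => r], st.2 * 2))
      ([], 1)
    = (List.replicate m ((List.range m).map (fun j => (2 : Int) ^ j)), 2 ^ m) := by
  induction m with
  | zero => rfl
  | succ k ih =>
    rw [List.range_succ, List.foldl_append, ih]
    simp only [List.foldl_cons, List.foldl_nil, List.map_replicate]
    cases k with
    | zero => simp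
    | succ q =>
      simp only [List.replicate_succ, List.map_cons, List.map_append, List.map_nil,
        List.cons_append, rep_snoc, pow_succ]

-- ===== VERDICT (by name: the statement is the Claim_ definition above) =====
theorem matrice_nXn_spec : Claim_equal_matrice_nXn := by
  intro n _
  unfold Spec_matrice_nXn matrice_nXn matrice_nXn_alt
  rw [foldl_push_eq_map, PySem.List.pyRange_one]
  simp only [foldl_push_eq_map, List.nil_append, List.map_map, List.foldl_map, Int.sub_zero, Function.comp_def]
  have h := alt_loop_eq n.toNat
  refine Eq.trans ?_ (congrArg Prod.fst h).symm
  rw [List.map_const', List.length_range]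
  congr 1
  apply List.map_congr_left
  intro j hj
  simp
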